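-- pv_equiv track=rewrite | github.com/QoSz/Year1-eCommerce-Website | wsgi.py | parse
-- ===== SOURCE A (Python) =====
-- def parse(data):
--     ans = []
--     i = 0
--     while i < len(data):
--         curr = []
--         for j in range(7):
--             if i < len(data):
--                 curr.append(data[i])
--                 i += 1
--                 continue
--             break
--         ans.append(curr)
--     return ans
-- ===== SOURCE B (Python) =====
-- def parse(data):
--     return [list(data[i:i+7]) for i in range(0, len(data), 7)]
-- ===== Notes on version B (the rewrite author's own statement) =====
-- stated objective: simpler
-- what changed: Replaces the nested while/for loops with mutable index state by a single strided-range comprehension that slices each 7-element chunk directly.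
import Mathlib
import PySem

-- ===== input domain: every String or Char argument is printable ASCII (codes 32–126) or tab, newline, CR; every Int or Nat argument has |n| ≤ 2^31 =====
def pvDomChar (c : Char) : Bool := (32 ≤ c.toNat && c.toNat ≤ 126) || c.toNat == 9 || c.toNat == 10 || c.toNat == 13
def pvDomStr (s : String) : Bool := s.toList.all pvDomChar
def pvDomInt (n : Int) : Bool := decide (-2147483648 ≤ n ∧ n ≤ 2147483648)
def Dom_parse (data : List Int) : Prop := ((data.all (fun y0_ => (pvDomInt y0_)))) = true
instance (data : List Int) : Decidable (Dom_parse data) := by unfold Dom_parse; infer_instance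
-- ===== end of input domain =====

-- B replaces A's nested loops by a strided-range comprehension over slices (objective: simpler).

-- ===== PORT A =====
-- inner 'for j in range(7)' loop: appends data[i] and advances i, breaking once i ≥ len(data)
def parseInner (data : List Int) (j : Nat) (curr : List Int) (i : Nat) : List Int × Nat :=
  match j with
  | 0 => (curr, i)
  | j' + 1 =>
    if i < data.length then
      parseInner data j' (curr ++ [PySem.List.pyGetD data (i : Int) 0]) (i + 1)
    else
      (curr, i)

-- characterisation of the inner loop (the outer loop's termination cites it)
theorem parseInner_eq (data : List Int) : ∀ (j : Nat) (curr : List Int) (i : Nat),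
    parseInner data j curr i = (curr ++ (data.drop i).take j, i + min j (data.length - i)) := by
  intro j
  induction j with
  | zero => intro curr i; simp [parseInner]
  | succ j' ih =>
    intro curr i
    by_cases h : i < data.length
    · rw [parseInner, if_pos h, ih]
      have hd : data.drop i = data[i] :: data.drop (i + 1) := (List.getElem_cons_drop h).symm
      have hget : PySem.List.pyGetD data (i : Int) 0 = data[i] := by
        rw [PySem.List.pyGetD_eq_getElem data 0 (by positivity) (by exact_mod_cast h)]
        simp
      rw [hget, Prod.mk.injEq]
      constructor
      · rw [hd, List.take_succ_cons, List.append_assoc, List.singleton_append]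
      · omega
    · rw [parseInner, if_neg h]
      have hd : data.drop i = [] := List.drop_eq_nil_of_le (by omega)
      rw [hd, Prod.mk.injEq]
      constructor
      · simp
      · omega

-- outer 'while i < len(data)' loop
def parseOuter (data : List Int) (i : Nat) : List (List Int) :=
  if _h : i < data.length then
    let p := parseInner data 7 [] i
    p.1 :: parseOuter data p.2
  else
    []
termination_by data.length - i
decreasing_by
  simp only [parseInner_eq]
  omega

def parse (data : List Int) : List (List Int) := parseOuter data 0

-- ===== PORT B =====
def parse_alt (data : List Int) : List (List Int) :=
  (PySem.List.pyRange 0 (data.length : Int) 7).map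
    (fun i => PySem.List.slice data (some i) (some (i + 7)))

-- ===== PRECONDITION & SPEC =====
def Spec_parse (data : List Int) (out : List (List Int)) : Prop := out = parse_alt data
instance (data : List Int) (out : List (List Int)) : Decidable (Spec_parse data out) := by unfold Spec_parse; infer_instance

-- ===== CLAIM (what is proved, stated in full; the proofs are below) =====
def Claim_equal_parse : Prop := ∀ (data : List Int), Dom_parse data → Spec_parse data (parse data)

-- ===== LEMMAS AND PROOFS =====

-- step-s range peels its head when nonempty
theorem pyRange_pos_cons (a b s : Int) (hs : 0 < s) (h : a < b) :
    PySem.List.pyRange a b s = a :: PySem.List.pyRange (a + s) b s := by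
  rw [PySem.List.pyRange_of_pos a b hs, PySem.List.pyRange_of_pos (a + s) b hs]
  have hx : (0 : Int) ≤ b - a - 1 := by omega
  have key : ((b - a + s - 1) / s).toNat
      = (if a + s < b then ((b - (a + s) + s - 1) / s).toNat else 0) + 1 := by
    have h1 : b - a + s - 1 = (b - a - 1) + 1 * s := by ring
    have h2 : (b - a + s - 1) / s = (b - a - 1) / s + 1 := by
      rw [h1, Int.add_mul_ediv_right _ _ (by omega)]
    by_cases hc : a + s < b
    · rw [if_pos hc]
      have : b - (a + s) + s - 1 = b - a - 1 := by ring
      rw [this, h2]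
      have : (0:Int) ≤ (b - a - 1) / s := Int.ediv_nonneg hx (by omega)
      omega
    · rw [if_neg hc]
      have hz : (b - a - 1) / s = 0 := Int.ediv_eq_zero_of_lt hx (by omega)
      rw [h2, hz]
      rfl
  rw [if_pos h, key, List.range_succ_eq_map, List.map_cons, List.map_map, List.cons.injEq]
  constructor
  · simp
  · apply List.map_congr_left
    intro k _
    simp [Nat.succ_eq_add_one]
    ring

theorem pyRange_pos_nil (a b s : Int) (hs : 0 < s) (h : b ≤ a) :
    PySem.List.pyRange a b s = [] := by
  rw [PySem.List.pyRange_of_pos a b hs, if_neg (by omega)]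
  simp

-- a slice at a natural index with natural width is drop-then-take
theorem slice_chunk (data : List Int) (i : Nat) :
    PySem.List.slice data (some (i : Int)) (some ((i : Int) + 7)) = (data.drop i).take 7 := by
  rw [PySem.List.slice_toNat data (by positivity) (by positivity)]
  have h1 : ((i : Int)).toNat = i := Int.toNat_natCast i
  have h2 : ((i : Int) + 7).toNat = i + 7 := by omega
  rw [h1, h2]
  congr 1
  omega

theorem parseOuter_eq (data : List Int) : ∀ (i : Nat),
    parseOuter data i =
      (PySem.List.pyRange (i : Int) (data.length : Int) 7).map
        (fun k => PySem.List.slice data (some k) (some (k + 7))) := by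
  intro i
  induction hn : data.length - i using Nat.strong_induction_on generalizing i with
  | _ n ih =>
    by_cases h : i < data.length
    · rw [parseOuter, dif_pos h, parseInner_eq,
        pyRange_pos_cons _ _ _ (by omega) (by exact_mod_cast h), List.map_cons]
      simp only
      rw [slice_chunk, List.cons.injEq]
      constructor
      · simp
      · by_cases h7 : i + 7 ≤ data.length
        · have hm : min 7 (data.length - i) = 7 := by omega
          rw [hm, ih (data.length - (i + 7)) (by omega) (i + 7) rfl]
          norm_num
        · have hm : i + min 7 (data.length - i) = data.length := by omega
          rw [hm, parseOuter, dif_neg (by omega),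
            pyRange_pos_nil _ _ _ (by omega) (by exact_mod_cast (by omega : data.length ≤ i + 7))]
          norm_num
    · rw [parseOuter, dif_neg h,
        pyRange_pos_nil _ _ _ (by omega) (by exact_mod_cast (by omega : data.length ≤ i))]
      simp

-- ===== VERDICT (by name: the statement is the Claim_ definition above) =====
theorem parse_spec : Claim_equal_parse := by
  intro data _
  unfold Spec_parse parse parse_alt
  rw [parseOuter_eq data 0]
  norm_num
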